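-- pv_equiv track=rewrite | github.com/pepze21/Coding_practice_Programers | yesan_lv1.py | solution
-- ===== SOURCE A (Python) =====
-- def solution(d, budget):
--     d = sorted(d)
--     for i in range(len(d) - 1):
--         d[i + 1] += d[i]
--     for i in range(len(d)):
--         if d[i] > budget:
--             return i
--     return len(d)
-- ===== SOURCE B (Python) =====
-- def solution(d, budget):
--     rest = list(d)
--     total = 0
--     count = 0
--     while rest:
--         m = min(rest)
--         if total + m > budget:
--             break
--         total += m
--         rest.remove(m)
--         count += 1
--     return count
-- ===== Notes on version B (the rewrite author's own statement) =====
-- stated objective: alternative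
-- what changed: A sorts the list, builds a full prefix-sum table and scans it for the first entry above budget; B never sorts: it greedily extracts the minimum of the remaining list with min()/remove() one department at a time, stopping as soon as the next cheapest no longer fits.
import Mathlib
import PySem

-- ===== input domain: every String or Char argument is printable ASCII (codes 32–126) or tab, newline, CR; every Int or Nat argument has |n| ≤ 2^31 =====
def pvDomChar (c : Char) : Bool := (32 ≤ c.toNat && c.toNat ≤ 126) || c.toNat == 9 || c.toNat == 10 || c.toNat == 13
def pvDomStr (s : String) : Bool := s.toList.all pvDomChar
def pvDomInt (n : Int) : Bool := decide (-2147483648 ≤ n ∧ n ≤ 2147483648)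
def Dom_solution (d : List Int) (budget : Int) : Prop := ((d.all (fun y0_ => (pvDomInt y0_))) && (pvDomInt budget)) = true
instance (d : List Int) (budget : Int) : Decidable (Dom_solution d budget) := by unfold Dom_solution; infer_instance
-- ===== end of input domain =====

-- B replaces A's sort + prefix-sum table + scan by a greedy min()/remove() extraction loop
-- that never sorts (same return value; neither mutates the caller's list).

-- ===== PORT A =====
-- second loop of A: 'for i in range(len(d)): if d[i] > budget: return i' then 'return len(d)',
-- walking the list with its index i
def solutionScanA (budget : Int) : List Int → Int → Int
  | [], i => i
  | x :: xs, i => if x > budget then i else solutionScanA budget xs (i + 1)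

def solution (d : List Int) (budget : Int) : Int :=
  let s := PySem.List.sorted d (fun x => x) false
  -- first loop: for i in range(len(d) - 1): d[i+1] += d[i]   (indices produced by range are ≥ 0)
  let p := (PySem.List.pyRange 0 (PySem.List.len s - 1) 1).foldl
    (fun acc i => PySem.List.pySetD acc (i + 1)
      (PySem.List.pyGetD acc (i + 1) 0 + PySem.List.pyGetD acc i 0)) s
  solutionScanA budget p 0

-- ===== PORT B =====
-- the while loop of B: 'while rest: m = min(rest); if total + m > budget: break;
-- total += m; rest.remove(m); count += 1'
def solutionWhileB (budget : Int) (total count : Int) (rest : List Int) : Int :=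
  match h : PySem.List.min? rest (fun x => x) with
  | none => count
  | some m =>
    if total + m > budget then count
    else solutionWhileB budget (total + m) (count + 1) ((PySem.List.remove? rest m).getD [])
termination_by rest.length
decreasing_by
  have hm : m ∈ rest := PySem.List.min?_mem h
  rw [PySem.List.remove?_eq_some_erase rest m hm, Option.getD_some]
  have := List.length_erase_of_mem hm
  have : rest.length ≠ 0 := fun h0 => by simp [List.length_eq_zero_iff.mp h0] at hm
  omega

def solution_alt (d : List Int) (budget : Int) : Int :=
  solutionWhileB budget 0 0 d

-- ===== PRECONDITION & SPEC =====
def Spec_solution (d : List Int) (budget : Int) (out : Int) : Prop := out = solution_alt d budget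
instance (d : List Int) (budget : Int) (out : Int) : Decidable (Spec_solution d budget out) := by unfold Spec_solution; infer_instance

-- ===== CLAIM (what is proved, stated in full; the proofs are below) =====
def Claim_equal_solution : Prop := ∀ (d : List Int) (budget : Int), Dom_solution d budget → Spec_solution d budget (solution d budget)

-- ===== LEMMAS AND PROOFS =====

-- running total/count over an already ascending list: the common reference both ports reduce to
def pvGoSorted (budget : Int) : Int → Int → List Int → Int
  | _, count, [] => count
  | total, count, x :: xs =>
      let t := total + x
      if t > budget then count else pvGoSorted budget t (count + 1) xs

-- prefix sums of l starting from accumulator t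
def pvPfx (t : Int) : List Int → List Int
  | [] => []
  | x :: xs => (t + x) :: pvPfx (t + x) xs

theorem pvPfx_length (t : Int) (l : List Int) : (pvPfx t l).length = l.length := by
  induction l generalizing t with
  | nil => rfl
  | cons x xs ih => simp [pvPfx, ih]

theorem pvPfx_append (t : Int) (a b : List Int) :
    pvPfx t (a ++ b) = pvPfx t a ++ pvPfx (t + a.sum) b := by
  induction a generalizing t with
  | nil => simp [pvPfx]
  | cons x xs ih => simp [pvPfx, ih, add_assoc]

theorem pvPfx_getD (t : Int) (l : List Int) (i : Nat) (h : i < l.length) :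
    (pvPfx t l).getD i 0 = t + (l.take (i + 1)).sum := by
  induction l generalizing t i with
  | nil => simp at h
  | cons x xs ih =>
    cases i with
    | zero => simp [pvPfx]
    | succ j =>
      simp only [pvPfx, List.getD_cons_succ, List.take_succ_cons, List.sum_cons]
      rw [ih (t + x) j (by simpa using h)]
      ring

theorem pvSet_append_length (a b : List Int) (n : Nat) (h : n = a.length) (v : Int) :
    (a ++ b).set n v = a ++ b.set 0 v := by
  subst h
  induction a with
  | nil => rfl
  | cons x xs ih => simp [ih]

theorem pvLoop1_inv (s : List Int) (k : Nat) (hk : k < s.length) :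
    (PySem.List.pyRange 0 k 1).foldl
      (fun acc i => PySem.List.pySetD acc (i + 1)
        (PySem.List.pyGetD acc (i + 1) 0 + PySem.List.pyGetD acc i 0)) s
      = pvPfx 0 (s.take (k + 1)) ++ s.drop (k + 1) := by
  induction k with
  | zero =>
    rw [show ((0 : Nat) : Int) = 0 from rfl, PySem.List.pyRange_one_eq_nil le_rfl]
    cases s with
    | nil => simp at hk
    | cons x xs => simp [pvPfx]
  | succ k ih =>
    have hk' : k < s.length := by omega
    have hcast : ((k + 1 : Nat) : Int) = (k : Int) + 1 := by push_cast; ring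
    rw [hcast, PySem.List.pyRange_one_succ_right (by positivity), List.foldl_append,
        ih hk']
    simp only [List.foldl_cons, List.foldl_nil]
    have hlenP : (pvPfx 0 (s.take (k + 1))).length = k + 1 := by
      rw [pvPfx_length, List.length_take]; omega
    have hgk : PySem.List.pyGetD (pvPfx 0 (s.take (k + 1)) ++ s.drop (k + 1)) (k : Int) 0
        = (s.take (k + 1)).sum := by
      rw [PySem.List.pyGetD_natCast, List.getD_append _ _ _ _ (by omega),
          pvPfx_getD 0 (s.take (k + 1)) k (by rw [List.length_take]; omega)]
      rw [List.take_take]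
      simp
    have hdrop : s.drop (k + 1) = s[k + 1] :: s.drop (k + 2) := List.drop_eq_getElem_cons hk
    have hgk1 : PySem.List.pyGetD (pvPfx 0 (s.take (k + 1)) ++ s.drop (k + 1)) ((k : Int) + 1) 0
        = s[k + 1] := by
      rw [show (k : Int) + 1 = ((k + 1 : Nat) : Int) by push_cast; ring,
          PySem.List.pyGetD_natCast, List.getD_append_right _ _ _ _ (by omega), hlenP,
          Nat.sub_self, hdrop]
      rfl
    rw [hgk, hgk1,
        show (k : Int) + 1 = ((k + 1 : Nat) : Int) by push_cast; ring,
        PySem.List.pySetD_natCast, pvSet_append_length _ _ _ (by omega), hdrop]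
    have htake : s.take (k + 1 + 1) = s.take (k + 1) ++ [s[k + 1]] :=
      List.take_succ_eq_append_getElem hk
    rw [htake, pvPfx_append]
    simp [pvPfx, List.set]
    ring

theorem pvScan_eq_go (budget : Int) (xs : List Int) (t i : Int) :
    solutionScanA budget (pvPfx t xs) i = pvGoSorted budget t i xs := by
  induction xs generalizing t i with
  | nil => rfl
  | cons x xs ih =>
    simp only [pvPfx, solutionScanA, pvGoSorted]
    split_ifs with h
    · rfl
    · exact ih (t + x) (i + 1)

-- A's value equals the running-total loop over its sorted copy
theorem solution_eq_goSorted (d : List Int) (budget : Int) :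
    solution d budget = pvGoSorted budget 0 0 (PySem.List.sorted d (fun x => x) false) := by
  unfold solution
  dsimp only
  set s := PySem.List.sorted d (fun x => x) false with hs
  rcases Nat.eq_zero_or_pos s.length with h0 | hpos
  · rw [List.length_eq_zero_iff] at h0
    simp [h0, PySem.List.pyRange_one_eq_nil, solutionScanA, pvGoSorted, PySem.List.len]
  · have hk : s.length - 1 < s.length := by omega
    have hcast : PySem.List.len s - 1 = ((s.length - 1 : Nat) : Int) := by
      simp [PySem.List.len_eq]; omega
    rw [hcast, pvLoop1_inv s (s.length - 1) hk]
    have h1 : s.length - 1 + 1 = s.length := by omega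
    rw [h1, List.take_length, List.drop_length, List.append_nil]
    exact pvScan_eq_go budget s 0 0

-- B's greedy min-extraction loop equals the running-total loop over ANY ascending permutation
theorem pvWhile_eq_go (budget : Int) :
    ∀ (n : Nat) (l s : List Int), l.length ≤ n → s.Perm l → s.Pairwise (· ≤ ·) →
      ∀ (t i : Int), solutionWhileB budget t i l = pvGoSorted budget t i s := by
  intro n
  induction n with
  | zero =>
    intro l s hn hp _ t i
    have hl : l = [] := List.length_eq_zero_iff.mp (by omega)
    have hsnil : s = [] := List.Perm.eq_nil (hl ▸ hp)
    subst hl; subst hsnil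
    rw [solutionWhileB.eq_def]
    rfl
  | succ n ih =>
    intro l s hn hp hpw t i
    cases s with
    | nil =>
      have hl : l = [] := hp.symm.eq_nil
      subst hl
      rw [solutionWhileB.eq_def]
      rfl
    | cons x s' =>
      have hxl : x ∈ l := hp.mem_iff.mp (List.mem_cons_self)
      have hlne : l ≠ [] := List.ne_nil_of_mem hxl
      obtain ⟨m, hm⟩ : ∃ m, PySem.List.min? l (fun y => y) = some m := by
        cases hmin : PySem.List.min? l (fun y => y) with
        | none =>
          exfalso
          cases hl : l with
          | nil => exact hlne hl
          | cons a t => rw [hl, PySem.List.min?_id_cons] at hmin; cases hmin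
        | some m => exact ⟨m, rfl⟩
      have hmem : m ∈ l := PySem.List.min?_mem hm
      have hmx : m = x := by
        have h1 : m ≤ x := PySem.List.min?_isMin hm x hxl
        have hms : m ∈ x :: s' := hp.symm.mem_iff.mp hmem
        rcases List.mem_cons.mp hms with h | h
        · exact h
        · have := (List.pairwise_cons.mp hpw).1 m h
          omega
      subst hmx
      rw [solutionWhileB.eq_def]
      split
      next hnone => rw [hm] at hnone; cases hnone
      next m' hm' =>
        rw [hm] at hm'
        injection hm' with hm''
        subst hm''
        simp only [pvGoSorted]
        split_ifs with hb
        · rfl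
        · rw [PySem.List.remove?_eq_some_erase l m hmem, Option.getD_some]
          have hperm' : s'.Perm (l.erase m) := by
            have := hp.erase m
            simpa [List.erase_cons_head] using this
          have hlen' : (l.erase m).length ≤ n := by
            have h1 := List.length_erase_of_mem hmem
            have h2 : 0 < l.length := List.length_pos_of_mem hmem
            omega
          exact ih (l.erase m) s' hlen' hperm' (List.pairwise_cons.mp hpw).2 (t + m) (i + 1)

-- ===== VERDICT (by name: the statement is the Claim_ definition above) =====
theorem solution_spec : Claim_equal_solution := by
  intro d budget _
  unfold Spec_solution solution_alt
  rw [solution_eq_goSorted]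
  exact (pvWhile_eq_go budget d.length d (PySem.List.sorted d (fun x => x) false)
    le_rfl (PySem.List.sorted_perm d _ _) (PySem.List.sorted_pairwise d _) 0 0).symm
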